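-- pv_equiv track=rewrite | github.com/andreszr/sentence-parser-code-challenge | parser.py | replace_sentence
-- ===== SOURCE A (Python) =====
-- def replace_sentence(sentence):
--     def process_word(word):
--         if len(word) <= 2:
--             return word
--         else:
--             return f"{word[0]}{len(set(word[1:-1]))}{word[-1]}"
--
--     result = []
--     word = ""
--     for char in sentence:
--         if char.isalpha():
--             word += char
--         else:
--             result.append(process_word(word))
--             result.append(char)
--             word = ""
--
--     result.append(process_word(word))
--
--     return "".join(result)
-- ===== SOURCE B (Python) =====
-- def replace_sentence(sentence):
--     def abbrev(word):
--         if len(word) <= 2: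
--             return word
--         return f"{word[0]}{len(set(word[1:-1]))}{word[-1]}"
--
--     pieces = []
--     n = len(sentence)
--     i = 0
--     while i < n:
--         j = i + 1
--         if sentence[i].isalpha():
--             while j < n and sentence[j].isalpha():
--                 j += 1
--             pieces.append(abbrev(sentence[i:j]))
--         else:
--             while j < n and not sentence[j].isalpha():
--                 j += 1
--             pieces.append(sentence[i:j])
--         i = j
--     return "".join(pieces)
-- ===== Notes on version B (the rewrite author's own statement) =====
-- stated objective: alternative
-- what changed: B replaces A's char-by-char accumulator loop (growing a pending word, flushing it at each separator) with an index-based run scanner that slices maximal alphabetic/non-alphabetic runs and maps the abbreviation over alphabetic runs.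
import Mathlib
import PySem

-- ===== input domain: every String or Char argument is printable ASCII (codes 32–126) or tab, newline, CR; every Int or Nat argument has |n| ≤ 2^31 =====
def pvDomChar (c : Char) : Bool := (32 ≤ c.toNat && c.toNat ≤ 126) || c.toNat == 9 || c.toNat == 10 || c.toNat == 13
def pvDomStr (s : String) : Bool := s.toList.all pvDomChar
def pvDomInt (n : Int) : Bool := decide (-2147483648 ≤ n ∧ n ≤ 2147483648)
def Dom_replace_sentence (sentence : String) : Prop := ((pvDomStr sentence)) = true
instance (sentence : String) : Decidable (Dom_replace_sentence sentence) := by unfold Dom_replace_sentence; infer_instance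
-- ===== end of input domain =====

-- ===== PORT A =====
-- B scans runs by index instead of accumulating a pending word; alternative decomposition, same cost.
-- process_word, shared shape: first char + str(len(set(middle))) + last char
def pvProcA (w : List Char) : List Char :=
  if w.length ≤ 2 then w
  else
    PySem.List.pyGetD w 0 ' ' ::
      (PySem.Int.toChars (PySem.Set.len (PySem.Set.ofList (PySem.List.slice w (some 1) (some (-1))))) ++
        [PySem.List.pyGetD w (-1) ' '])

def replace_sentence (sentence : String) : String :=
  let st := sentence.toList.foldl
    (fun (st : List (List Char) × List Char) c =>
      if PySem.Chars.isalpha c then (st.1, st.2 ++ [c])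
      else (st.1 ++ [pvProcA st.2, [c]], []))
    ([], [])
  String.ofList ((st.1 ++ [pvProcA st.2]).flatten)

-- ===== PORT B =====
def pvAbbrevB (w : List Char) : List Char :=
  if w.length ≤ 2 then w
  else
    PySem.List.pyGetD w 0 ' ' ::
      (PySem.Int.toChars (PySem.Set.len (PySem.Set.ofList (PySem.List.slice w (some 1) (some (-1))))) ++
        [PySem.List.pyGetD w (-1) ' '])

-- index scanner of Source B, expressed structurally: each step takes one maximal run
def pvRunsB : List Char → List Char
  | [] => []
  | c :: cs =>
    if PySem.Chars.isalpha c then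
      pvAbbrevB (c :: cs.takeWhile (fun d => PySem.Chars.isalpha d)) ++
        pvRunsB (cs.dropWhile (fun d => PySem.Chars.isalpha d))
    else
      (c :: cs.takeWhile (fun d => !PySem.Chars.isalpha d)) ++
        pvRunsB (cs.dropWhile (fun d => !PySem.Chars.isalpha d))
termination_by l => l.length
decreasing_by
  · simpa using Nat.lt_succ_of_le (List.length_dropWhile_le _ _)
  · simpa using Nat.lt_succ_of_le (List.length_dropWhile_le _ _)

def replace_sentence_alt (sentence : String) : String :=
  String.ofList (pvRunsB sentence.toList)

-- ===== PRECONDITION & SPEC =====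
def Spec_replace_sentence (sentence : String) (out : String) : Prop := out = replace_sentence_alt sentence
instance (sentence : String) (out : String) : Decidable (Spec_replace_sentence sentence out) := by unfold Spec_replace_sentence; infer_instance

-- ===== CLAIM (what is proved, stated in full; the proofs are below) =====
def Claim_equal_replace_sentence : Prop := ∀ (sentence : String), Dom_replace_sentence sentence → Spec_replace_sentence sentence (replace_sentence sentence)

-- ===== LEMMAS AND PROOFS =====

-- A's loop, written as a recursion carrying the pending word
def pvCore (w : List Char) : List Char → List Char
  | [] => pvProcA w
  | c :: cs =>
    if PySem.Chars.isalpha c then pvCore (w ++ [c]) cs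
    else pvProcA w ++ c :: pvCore [] cs

theorem pvA_fold_core (l : List Char) : ∀ (acc : List (List Char)) (w : List Char),
    (let st := l.foldl
      (fun (st : List (List Char) × List Char) c =>
        if PySem.Chars.isalpha c then (st.1, st.2 ++ [c])
        else (st.1 ++ [pvProcA st.2, [c]], []))
      (acc, w)
     (st.1 ++ [pvProcA st.2]).flatten) = acc.flatten ++ pvCore w l := by
  induction l with
  | nil => intro acc w; simp [pvCore]
  | cons c cs ih =>
    intro acc w
    by_cases h : PySem.Chars.isalpha c = true
    · simp only [List.foldl_cons, h, if_pos, pvCore]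
      exact ih acc (w ++ [c])
    · simp only [List.foldl_cons, pvCore, h, if_neg, Bool.false_eq_true, not_false_iff]
      rw [ih]
      simp

theorem pvAbbrev_eq_proc (w : List Char) : pvAbbrevB w = pvProcA w := rfl

theorem pvRunsB_chunk (cs : List Char) :
    cs.takeWhile (fun d => !PySem.Chars.isalpha d) ++
      pvRunsB (cs.dropWhile (fun d => !PySem.Chars.isalpha d)) = pvRunsB cs := by
  cases cs with
  | nil => simp [pvRunsB]
  | cons d ds =>
    by_cases h : PySem.Chars.isalpha d = true
    · simp [h]
    · simp only [List.takeWhile_cons, List.dropWhile_cons, h, Bool.not_false, Bool.false_eq_true,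
        if_pos, if_true]
      rw [pvRunsB]
      simp [h]

theorem pvTakeWhile_alpha_append (w : List Char) (h : ∀ c ∈ w, PySem.Chars.isalpha c = true)
    (rest : List Char) :
    (w ++ rest).takeWhile (fun d => PySem.Chars.isalpha d) =
      w ++ rest.takeWhile (fun d => PySem.Chars.isalpha d) ∧
    (w ++ rest).dropWhile (fun d => PySem.Chars.isalpha d) =
      rest.dropWhile (fun d => PySem.Chars.isalpha d) := by
  induction w with
  | nil => simp
  | cons a ws ih =>
    have ha : PySem.Chars.isalpha a = true := h a (by simp)
    have := ih (fun c hc => h c (by simp [hc]))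
    simp [List.takeWhile_cons, List.dropWhile_cons, ha, this.1, this.2]

theorem pvCore_eq_runs (l : List Char) : ∀ (w : List Char),
    (∀ c ∈ w, PySem.Chars.isalpha c = true) → pvCore w l = pvRunsB (w ++ l) := by
  induction l with
  | nil =>
    intro w hw
    cases w with
    | nil => simp [pvCore, pvRunsB, pvProcA]
    | cons a ws =>
      have ha : PySem.Chars.isalpha a = true := hw a (by simp)
      have hws : ∀ c ∈ ws, PySem.Chars.isalpha c = true := fun c hc => hw c (by simp [hc])
      have htw : ws.takeWhile (fun d => PySem.Chars.isalpha d) = ws := by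
        simpa using (pvTakeWhile_alpha_append ws hws []).1
      have hdw : ws.dropWhile (fun d => PySem.Chars.isalpha d) = [] := by
        simpa using (pvTakeWhile_alpha_append ws hws []).2
      simp [pvCore, pvRunsB, ha, htw, hdw, pvAbbrev_eq_proc]
  | cons c cs ih =>
    intro w hw
    by_cases h : PySem.Chars.isalpha c = true
    · have hall : ∀ d ∈ w ++ [c], PySem.Chars.isalpha d = true := by
        intro d hd
        rcases List.mem_append.1 hd with hd' | hd'
        · exact hw d hd'
        · simp at hd'; simpa [hd'] using h
      have := ih (w ++ [c]) hall
      rw [pvCore, if_pos h, this, List.append_assoc]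
      simp
    · have hrest : pvRunsB (c :: cs) = c :: pvRunsB cs := by
        rw [pvRunsB]
        simp only [h, Bool.false_eq_true, if_false]
        have := pvRunsB_chunk cs
        simp only [List.takeWhile_cons, List.dropWhile_cons, h, Bool.not_false, if_true] at *
        rw [List.cons_append, this]
      have hmain : pvRunsB (w ++ c :: cs) = pvProcA w ++ pvRunsB (c :: cs) := by
        cases w with
        | nil => simp [pvProcA]
        | cons a ws =>
          have ha : PySem.Chars.isalpha a = true := hw a (by simp)
          have hws : ∀ d ∈ ws, PySem.Chars.isalpha d = true := fun d hd => hw d (by simp [hd])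
          have hta := pvTakeWhile_alpha_append ws hws (c :: cs)
          have htc : (c :: cs).takeWhile (fun d => PySem.Chars.isalpha d) = [] := by
            simp [List.takeWhile_cons, h]
          have hdc : (c :: cs).dropWhile (fun d => PySem.Chars.isalpha d) = c :: cs := by
            simp [List.dropWhile_cons, h]
          rw [List.cons_append, pvRunsB]
          simp [ha, hta.1, hta.2, htc, hdc, pvAbbrev_eq_proc]
      rw [pvCore, if_neg (by simp [h]), hmain, hrest, ih [] (by simp)]
      simp

-- ===== VERDICT (by name: the statement is the Claim_ definition above) =====
theorem replace_sentence_spec : Claim_equal_replace_sentence := by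
  intro s _
  unfold Spec_replace_sentence replace_sentence replace_sentence_alt
  have h1 := pvA_fold_core s.toList [] []
  simp only [List.flatten_nil, List.nil_append] at h1
  simp only []
  rw [h1, pvCore_eq_runs s.toList [] (by simp)]
  simp
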